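-- pv_equiv track=rewrite | github.com/silviajanikova/pv248 | 05-linalg/eqn.py | get_coef_matrix
-- ===== SOURCE A (Python) =====
-- def get_variables(data):
-- 	keys = set()
-- 	for eq in data:
-- 		for k, v in eq.items():
-- 			if k == 'constant':
-- 				continue
-- 			keys.add(k)
--
-- 	keys = sorted(keys)
--
-- 	return keys
--
-- def get_coef_matrix(data):
-- 	keys = get_variables(data)
-- 	eqs_list =list()
--
-- 	for eq in data:
-- 		eq_list = list()
-- 		for key in keys:
-- 			if key in eq:
-- 				eq_list.append(eq[key])
-- 			else:
-- 				eq_list.append(0)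
-- 		eqs_list.append(eq_list)
--
-- 	return eqs_list
-- ===== SOURCE B (Python) =====
-- def get_coef_matrix(data):
--     keys = sorted({k for eq in data for k in eq if k != 'constant'})
--     col = {k: i for i, k in enumerate(keys)}
--     rows = []
--     for eq in data:
--         row = [0] * len(keys)
--         for k, v in eq.items():
--             if k != 'constant':
--                 row[col[k]] = v
--         rows.append(row)
--     return rows
-- ===== Notes on version B (the rewrite author's own statement) =====
-- stated objective: faster
-- what changed: Rows are zero-initialized to full width and filled by scattering each equation's own items through a precomputed key->column index map, instead of testing every sorted key for membership in every equation.
import Mathlib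
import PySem

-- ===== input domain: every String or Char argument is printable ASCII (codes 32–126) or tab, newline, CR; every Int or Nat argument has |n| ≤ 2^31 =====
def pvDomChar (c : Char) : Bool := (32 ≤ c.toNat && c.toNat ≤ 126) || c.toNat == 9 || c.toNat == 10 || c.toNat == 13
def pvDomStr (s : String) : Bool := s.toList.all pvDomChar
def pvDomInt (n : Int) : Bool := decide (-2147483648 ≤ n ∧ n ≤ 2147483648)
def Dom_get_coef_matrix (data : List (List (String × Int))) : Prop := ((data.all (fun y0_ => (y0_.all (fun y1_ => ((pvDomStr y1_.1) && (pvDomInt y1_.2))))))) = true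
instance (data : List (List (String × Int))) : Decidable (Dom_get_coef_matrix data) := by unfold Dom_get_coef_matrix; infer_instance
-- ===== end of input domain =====

-- B zero-fills each row and scatters the equation's own items via a key->column index
-- map, instead of probing every sorted key against every equation (objective: faster, constant factor).

-- ===== PORT A =====
def get_variables (data : List (List (String × Int))) : List String :=
  let keys : PySem.Set String :=
    data.foldl (fun keys eq =>
      eq.foldl (fun keys kv =>
        if kv.1 == "constant" then keys else PySem.Set.add keys kv.1) keys)
      PySem.Set.empty
  PySem.List.sorted keys (fun k => k) false

def get_coef_matrix (data : List (List (String × Int))) : List (List Int) :=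
  let keys := get_variables data
  data.foldl (fun eqs_list eq =>
    let d := PySem.Dict.mk eq
    eqs_list ++ [keys.foldl (fun eq_list key =>
      if d.contains key then eq_list ++ [d.getD key 0] else eq_list ++ [0]) []]) []

-- ===== PORT B =====
def get_coef_matrix_alt (data : List (List (String × Int))) : List (List Int) :=
  let keys := PySem.List.sorted
    (PySem.Set.ofList
      (((data.flatMap (fun eq => eq)).map (fun kv => kv.1)).filter (fun k => !(k == "constant"))))
    (fun k => k) false
  let col : PySem.Dict String Int :=
    (PySem.List.enumerate keys).foldl (fun d ik => d.insert ik.2 ik.1) PySem.Dict.empty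
  data.foldl (fun rows eq =>
    rows ++ [eq.foldl (fun row kv =>
      if kv.1 == "constant" then row
      else PySem.List.pySetD row (col.getD kv.1 0) kv.2)
      (List.replicate keys.length 0)]) []

-- ===== PRECONDITION & SPEC =====
-- Pre_ excludes association lists with a duplicated key inside one equation: such lists
-- encode no Python dict (Python's dict literal collapses duplicates), so A's behaviour
-- on them is not defined by the source; every real input satisfies Pre_.
def Pre_get_coef_matrix (data : List (List (String × Int))) : Prop :=
  ∀ eq ∈ data, (eq.map Prod.fst).Nodup
instance (data : List (List (String × Int))) : Decidable (Pre_get_coef_matrix data) := by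
  unfold Pre_get_coef_matrix; infer_instance
def pvWitness_get_coef_matrix : (List (List (String × Int))) :=
  [[("x", 1), ("constant", 2)], [("y", 3), ("x", -1)]]
def Spec_get_coef_matrix (data : List (List (String × Int))) (out : List (List Int)) : Prop := out = get_coef_matrix_alt data
instance (data : List (List (String × Int))) (out : List (List Int)) : Decidable (Spec_get_coef_matrix data out) := by unfold Spec_get_coef_matrix; infer_instance

-- ===== CLAIM (what is proved, stated in full; the proofs are below) =====
def Claim_equal_get_coef_matrix : Prop := ∀ (data : List (List (String × Int))), Dom_get_coef_matrix data → Pre_get_coef_matrix data → Spec_get_coef_matrix data (get_coef_matrix data)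

-- ===== LEMMAS AND PROOFS =====

-- proof-side name for B's sorted key list
def altKeys (data : List (List (String × Int))) : List String :=
  PySem.List.sorted
    (PySem.Set.ofList
      (((data.flatMap (fun eq => eq)).map (fun kv => kv.1)).filter (fun k => !(k == "constant"))))
    (fun k => k) false


-- A's nested set-building loop equals one fold of Set.add over the filtered flattened keys.
theorem ks_eq1 (eq : List (String × Int)) (init : PySem.Set String) :
    eq.foldl (fun ks kv => if kv.1 == "constant" then ks else PySem.Set.add ks kv.1) init
      = (((eq.map (fun kv => kv.1)).filter (fun k => !(k == "constant")))).foldl PySem.Set.add init := by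
  induction eq generalizing init with
  | nil => rfl
  | cons kv rest ih =>
    simp only [List.foldl_cons, List.map_cons, List.filter_cons]
    by_cases h : kv.1 == "constant"
    · rw [if_pos h]; simp only [h, Bool.not_true]; exact ih init
    · rw [if_neg h]; simp only [Bool.not_eq_true] at h
      simp only [h, Bool.not_false]; exact ih _

theorem ks_eq (data : List (List (String × Int))) (init : PySem.Set String) :
    data.foldl (fun ks eq =>
        eq.foldl (fun ks kv => if kv.1 == "constant" then ks else PySem.Set.add ks kv.1) ks) init
      = (((data.flatMap (fun eq => eq)).map (fun kv => kv.1)).filter (fun k => !(k == "constant"))).foldl PySem.Set.add init := by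
  induction data generalizing init with
  | nil => rfl
  | cons eq rest ih =>
    simp only [List.foldl_cons, List.flatMap_cons, List.map_append, List.filter_append,
      List.foldl_append]
    rw [ks_eq1, ih]

-- the two ports compute the same sorted key list
theorem keys_agree (data : List (List (String × Int))) :
    get_variables data = altKeys data := by
  unfold get_variables altKeys
  rw [ks_eq, PySem.Set.ofList_eq_foldl]
  rfl

theorem altKeys_nodup (data : List (List (String × Int))) : (altKeys data).Nodup := by
  unfold altKeys
  exact (PySem.List.sorted_ofList_pairwise_lt _).imp ne_of_lt

theorem mem_altKeys (data : List (List (String × Int))) (k : String) :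
    k ∈ altKeys data ↔
      k ∈ ((data.flatMap (fun eq => eq)).map (fun kv => kv.1)).filter (fun k => !(k == "constant")) := by
  unfold altKeys
  rw [PySem.List.mem_sorted, PySem.Set.mem_ofList]

theorem const_not_mem_altKeys (data : List (List (String × Int))) :
    "constant" ∉ altKeys data := by
  rw [mem_altKeys]
  simp

theorem mem_altKeys_of (data : List (List (String × Int))) (eq : List (String × Int))
    (kv : String × Int) (he : eq ∈ data) (hkv : kv ∈ eq) (hne : kv.1 ≠ "constant") :
    kv.1 ∈ altKeys data := by
  rw [mem_altKeys, List.mem_filter]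
  refine ⟨List.mem_map.mpr ⟨kv, List.mem_flatMap.mpr ⟨eq, he, hkv⟩, rfl⟩, by simpa using hne⟩

-- the column dict looks up the key's position in the (nodup) key list
theorem col_notmem (l : List (Int × String)) (d : PySem.Dict String Int) (k : String)
    (h : k ∉ l.map (fun ik => ik.2)) :
    (l.foldl (fun d ik => d.insert ik.2 ik.1) d).getD k 0 = d.getD k 0 := by
  induction l generalizing d with
  | nil => rfl
  | cons ik rest ih =>
    simp only [List.map_cons, List.mem_cons, not_or] at h
    simp only [List.foldl_cons]
    rw [ih _ h.2, PySem.Dict.getD_insert_of_ne _ _ _ h.1]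

theorem col_aux (keys : List String) (s : Int) (d : PySem.Dict String Int) (k : String)
    (hnd : keys.Nodup) (hk : k ∈ keys) :
    ((PySem.List.enumerate keys s).foldl (fun d ik => d.insert ik.2 ik.1) d).getD k 0
      = s + (keys.idxOf k : Int) := by
  induction keys generalizing s d with
  | nil => cases hk
  | cons a rest ih =>
    rw [PySem.List.enumerate_cons]
    simp only [List.foldl_cons]
    rcases List.mem_cons.mp hk with rfl | hk'
    · have ha : k ∉ rest := (List.nodup_cons.mp hnd).1
      have hm : k ∉ (PySem.List.enumerate rest (s+1)).map (fun ik => ik.2) := by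
        rw [PySem.List.map_snd_enumerate]; exact ha
      rw [col_notmem _ _ _ hm, PySem.Dict.getD_insert_self]
      simp
    · have hne : k ≠ a := by rintro rfl; exact (List.nodup_cons.mp hnd).1 hk'
      rw [ih (s+1) _ (List.nodup_cons.mp hnd).2 hk']
      rw [List.idxOf_cons_ne _ (fun h => hne h.symm)]
      push_cast; ring

theorem col_getD (keys : List String) (k : String) (hnd : keys.Nodup) (hk : k ∈ keys) :
    ((PySem.List.enumerate keys).foldl (fun d ik => d.insert ik.2 ik.1)
        PySem.Dict.empty).getD k 0 = (keys.idxOf k : Int) := by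
  rw [col_aux keys 0 _ k hnd hk]; ring

-- List.set at the index of a key, on a row that is a map over the keys
theorem set_map (keys : List String) (g : String → Int) (k : String) (v : Int)
    (hnd : keys.Nodup) (hk : k ∈ keys) :
    (keys.map g).set (keys.idxOf k) v = keys.map (fun k' => if k' = k then v else g k') := by
  induction keys with
  | nil => cases hk
  | cons a rest ih =>
    rcases List.mem_cons.mp hk with rfl | hk'
    · rw [List.idxOf_cons_self]
      simp only [List.map_cons, List.set_cons_zero]
      have hmc : rest.map (fun k' => if k' = k then v else g k') = rest.map g :=
        List.map_congr_left (fun x hx => by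
          have hx' : x ≠ k := by rintro rfl; exact (List.nodup_cons.mp hnd).1 hx
          simp [hx'])
      rw [hmc]
      simp
    · have hne : k ≠ a := by rintro rfl; exact (List.nodup_cons.mp hnd).1 hk'
      rw [List.idxOf_cons_ne _ (fun h => hne h.symm)]
      simp only [List.map_cons, List.set_cons_succ]
      rw [ih (List.nodup_cons.mp hnd).2 hk']
      simp [hne.symm]

-- B's scatter loop over one equation produces the dense lookup row
theorem scatter_map (keys : List String) (col : PySem.Dict String Int)
    (hnd : keys.Nodup) (hc : "constant" ∉ keys)
    (hcol : ∀ k ∈ keys, col.getD k 0 = (keys.idxOf k : Int)) :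
    ∀ (eq : List (String × Int)) (g : String → Int),
      (eq.map Prod.fst).Nodup →
      (∀ kv ∈ eq, kv.1 ≠ "constant" → kv.1 ∈ keys) →
      eq.foldl (fun row kv =>
          if kv.1 == "constant" then row
          else PySem.List.pySetD row (col.getD kv.1 0) kv.2) (keys.map g)
        = keys.map (fun k => match (PySem.Dict.mk eq).get? k with | some v => v | none => g k) := by
  intro eq
  induction eq with
  | nil =>
    intro g _ _
    simp [PySem.Dict.get?]
  | cons kv rest ih =>
    intro g hnodup hmem
    simp only [List.foldl_cons]
    by_cases h : kv.1 = "constant"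
    · rw [if_pos (by simp [h])]
      rw [ih g (by simpa using (List.nodup_cons.mp (by simpa using hnodup)).2)
        (fun p hp => hmem p (List.mem_cons_of_mem _ hp))]
      apply List.map_congr_left
      intro k hk
      have hkne : kv.1 ≠ k := by rintro rfl; exact hc (h ▸ hk)
      rw [PySem.Dict.get?_mk_cons, if_neg (by simpa using hkne)]
    · have hkv : kv.1 ∈ keys := hmem kv (List.mem_cons_self) h
      rw [if_neg (by simpa using h)]
      rw [hcol kv.1 hkv, PySem.List.pySetD_natCast,
        set_map keys g kv.1 kv.2 hnd hkv]
      rw [ih _ (by simpa using (List.nodup_cons.mp (by simpa using hnodup)).2)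
        (fun p hp => hmem p (List.mem_cons_of_mem _ hp))]
      apply List.map_congr_left
      intro k hk
      rw [PySem.Dict.get?_mk_cons]
      by_cases hk1 : kv.1 = k
      · subst hk1
        have hnone : (PySem.Dict.mk rest).get? kv.1 = none := by
          rw [PySem.Dict.get?_eq_none_iff_not_mem_keys, PySem.Dict.keys_mk]
          exact (List.nodup_cons.mp (by simpa using hnodup)).1
        simp [hnone]
      · have hb : (kv.1 == k) = false := by simpa using hk1
        rw [hb]
        cases hr : (PySem.Dict.mk rest).get? k with
        | some v => simp
        | none => simp [Ne.symm hk1]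

-- A's inner loop over the keys is the same dense lookup row
theorem rowA_map (keys : List String) (eq : List (String × Int)) :
    keys.foldl (fun eq_list key =>
        if (PySem.Dict.mk eq).contains key then eq_list ++ [(PySem.Dict.mk eq).getD key 0]
        else eq_list ++ [0]) []
      = keys.map (fun k => match (PySem.Dict.mk eq).get? k with | some v => v | none => 0) := by
  have h : ∀ (acc : List Int) key, (if (PySem.Dict.mk eq).contains key then
        acc ++ [(PySem.Dict.mk eq).getD key 0] else acc ++ [0])
      = acc ++ [match (PySem.Dict.mk eq).get? key with | some v => v | none => 0] := by
    intro acc key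
    rw [PySem.Dict.contains_eq_isSome_get?, PySem.Dict.getD_eq_get?_getD]
    cases (PySem.Dict.mk eq).get? key <;> simp
  calc keys.foldl (fun eq_list key =>
        if (PySem.Dict.mk eq).contains key then eq_list ++ [(PySem.Dict.mk eq).getD key 0]
        else eq_list ++ [0]) []
      = keys.foldl (fun eq_list key =>
          eq_list ++ [match (PySem.Dict.mk eq).get? key with | some v => v | none => 0]) [] := by
        exact PySem.List.foldl_congr_mem _ _ _ _ (fun acc key _ => h acc key)
    _ = keys.map (fun k => match (PySem.Dict.mk eq).get? k with | some v => v | none => 0) := by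
        rw [PySem.List.foldl_append_singleton_eq_map]; simp

-- ===== VERDICT (by name: the statement is the Claim_ definition above) =====
theorem get_coef_matrix_spec : Claim_equal_get_coef_matrix := by
  intro data _hdom hpre
  unfold Spec_get_coef_matrix get_coef_matrix get_coef_matrix_alt
  rw [show (PySem.List.sorted (PySem.Set.ofList
      (((data.flatMap (fun eq => eq)).map (fun kv => kv.1)).filter (fun k => !(k == "constant"))))
      (fun k => k) false) = altKeys data from rfl, keys_agree data]
  rw [PySem.List.foldl_append_singleton_eq_map, PySem.List.foldl_append_singleton_eq_map]
  simp only [List.nil_append]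
  apply List.map_congr_left
  intro eq he
  rw [rowA_map]
  rw [show List.replicate (altKeys data).length 0 = (altKeys data).map (fun _ => (0 : Int)) from
    List.map_const'.symm]
  rw [scatter_map (altKeys data) _ (altKeys_nodup data) (const_not_mem_altKeys data)
    (fun k hk => col_getD (altKeys data) k (altKeys_nodup data) hk)
    eq (fun _ => 0) (hpre eq he)
    (fun kv hkv hne => mem_altKeys_of data eq kv he hkv hne)]
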